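-- pv_equiv track=rewrite | github.com/seoyoee/coding-test | Programmers/Level2/70129.py | solution
-- ===== SOURCE A (Python) =====
-- def solution(s):
--     answer = [0, 0]
--
--     while s != "1":
--         n = s.count("1")
--         answer[1] += s.count("0")
--         s = ""
--
--         while n > 0:
--             s = str(n%2) + s
--             n //= 2
--
--         answer[0] += 1
--
--     return answer
-- ===== SOURCE B (Python) =====
-- def solution(s):
--     if s == "1":
--         return [0, 0]
--     zeros = s.count("0")
--     n = s.count("1")
--     # dp[m] = (transforms, zeros removed) needed to reduce the integer m down to 1,
--     # built bottom-up: dp[m] extends dp[popcount(m)], which is already computed since popcount(m) < m.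
--     dp = [(0, 0), (0, 0)]  # dp[0] is an unused placeholder
--     for m in range(2, n + 1):
--         p = bin(m).count("1")
--         dp.append((dp[p][0] + 1, dp[p][1] + m.bit_length() - p))
--     steps, removed = dp[n]
--     return [steps + 1, zeros + removed]
-- ===== Notes on version B (the rewrite author's own statement) =====
-- stated objective: alternative
-- what changed: B replaces A's chase of the popcount trajectory (rebuilding a binary string each step) by a bottom-up dynamic-programming table dp[m] = (transforms, zeros removed) for every m up to the input's count of ones, then reads the answer off dp[n] in one lookup.
import Mathlib
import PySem

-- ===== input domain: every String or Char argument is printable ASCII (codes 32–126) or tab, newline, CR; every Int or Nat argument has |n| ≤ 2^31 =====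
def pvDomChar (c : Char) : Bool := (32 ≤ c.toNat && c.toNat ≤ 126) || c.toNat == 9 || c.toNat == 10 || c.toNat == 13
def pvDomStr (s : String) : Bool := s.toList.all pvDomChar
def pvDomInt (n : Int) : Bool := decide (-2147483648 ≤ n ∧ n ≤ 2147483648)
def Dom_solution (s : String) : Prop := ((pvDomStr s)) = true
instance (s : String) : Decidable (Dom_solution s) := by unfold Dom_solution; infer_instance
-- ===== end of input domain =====

-- B replaces A's step-by-step trajectory chase (rebuilding a binary string each round) by a
-- bottom-up dynamic-programming table indexed by the count of ones; equivalence of the RETURN value.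

-- ===== PORT A =====
-- inner loop 'while n > 0: s = str(n%2) + s; n //= 2'; fuel only makes it total (n.toNat iterations suffice)
def pvBinLoop (fuel : Nat) (n : Int) (s : String) : String :=
  match fuel with
  | 0 => s
  | f + 1 =>
    if 0 < n then pvBinLoop f (PySem.Int.floordiv n 2) (PySem.Int.toStr (PySem.Int.mod n 2) ++ s)
    else s

-- outer loop 'while s != "1"'; fuel only makes it total: count-of-ones + 1 iterations suffice on Pre_
def pvLoopA (fuel : Nat) (s : String) (conv zeros : Int) : List Int :=
  match fuel with
  | 0 => [conv, zeros]
  | f + 1 =>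
    if s = "1" then [conv, zeros]
    else
      let n : Int := (PySem.Str.count s "1" : Int)
      pvLoopA f (pvBinLoop n.toNat n "") (conv + 1) (zeros + (PySem.Str.count s "0" : Int))

def solution (s : String) : List Int :=
  pvLoopA (PySem.Str.count s "1" + 1) s 0 0

-- ===== PORT B =====
-- body of 'for m in range(2, n+1): p = bin(m).count("1"); dp.append((dp[p][0]+1, dp[p][1]+m.bit_length()-p))'
-- dp[p] is ported with a default for totality; the index is always in range (1 ≤ p < m = length bound)
def pvDpStep (dp : List (Int × Int)) (m : Int) : List (Int × Int) :=
  let p : Int := (PySem.Int.bitCount m : Int)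
  let e := (PySem.List.pyGet? dp p).getD (0, 0)
  dp ++ [(e.1 + 1, e.2 + (PySem.Int.bitLength m : Int) - p)]

def solution_alt (s : String) : List Int :=
  if s = "1" then [0, 0]
  else
    let zeros : Int := (PySem.Str.count s "0" : Int)
    let n : Int := (PySem.Str.count s "1" : Int)
    let dp := (PySem.List.pyRange 2 (n + 1) 1).foldl pvDpStep [(0, 0), (0, 0)]
    let e := (PySem.List.pyGet? dp n).getD (0, 0)
    [e.1 + 1, zeros + e.2]

-- ===== PRECONDITION & SPEC =====
-- Pre_ excludes the inputs (s ≠ "1" containing no '1') on which A's while-loop never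
-- terminates (A returns no value there).
def Pre_solution (s : String) : Prop := s = "1" ∨ 1 ≤ PySem.Str.count s "1"
instance (s : String) : Decidable (Pre_solution s) := by unfold Pre_solution; infer_instance
def pvWitness_solution : String := "1011 x01"
def Spec_solution (s : String) (out : List Int) : Prop := out = solution_alt s
instance (s : String) (out : List Int) : Decidable (Spec_solution s out) := by unfold Spec_solution; infer_instance

-- ===== CLAIM (what is proved, stated in full; the proofs are below) =====
def Claim_equal_solution : Prop := ∀ (s : String), Dom_solution s → Pre_solution s → Spec_solution s (solution s)

-- ===== LEMMAS AND PROOFS =====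

-- the binary digits of m, least significant digit appended last (what A's inner loop builds)
def pvBinChars (m : Nat) : List Char :=
  if m = 0 then [] else pvBinChars (m / 2) ++ [if m % 2 = 1 then '1' else '0']
termination_by m
decreasing_by omega

theorem pvCount_go_singleton (c : Char) (cs : List Char) (fuel acc : Nat)
    (h : cs.length ≤ fuel) : PySem.Chars.count.go [c] fuel cs acc = acc + cs.count c := by
  induction cs generalizing fuel acc with
  | nil => cases fuel <;> simp [PySem.Chars.count.go]
  | cons x t ih =>
    cases fuel with
    | zero => simp at h
    | succ f =>
      simp only [List.length_cons, Nat.add_le_add_iff_right] at h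
      by_cases hx : c = x
      · subst hx
        simp [PySem.Chars.count.go, List.isPrefixOf, ih f (acc + 1) h, List.count_cons_self]
        omega
      · simp [PySem.Chars.count.go, List.isPrefixOf, hx, ih f acc h,
          List.count_cons_of_ne (fun hh => hx hh.symm)]

theorem pvStrCount_singleton (s : String) (c : Char) :
    PySem.Str.count s (String.ofList [c]) = s.toList.count c := by
  have h1 : PySem.Str.count s (String.ofList [c]) = PySem.Chars.count s.toList [c] := by simp
  rw [h1, PySem.Chars.count]
  simpa using pvCount_go_singleton c s.toList s.toList.length 0 le_rfl

theorem pvBinLoop_toList (fuel : Nat) : ∀ (m : Nat) (s : String), m ≤ fuel →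
    (pvBinLoop fuel (m : Int) s).toList = pvBinChars m ++ s.toList := by
  induction fuel with
  | zero => intro m s h; interval_cases m; simp [pvBinLoop, pvBinChars]
  | succ f ih =>
    intro m s h
    by_cases hm : m = 0
    · subst hm; simp [pvBinLoop, pvBinChars]
    · have hpos : (0 : Int) < (m : Int) := by exact_mod_cast Nat.pos_of_ne_zero hm
      have hdiv : PySem.Int.floordiv (m : Int) 2 = ((m / 2 : Nat) : Int) := by
        exact_mod_cast PySem.Int.floordiv_natCast m 2
      have hmod : PySem.Int.mod (m : Int) 2 = ((m % 2 : Nat) : Int) := by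
        exact_mod_cast PySem.Int.mod_natCast m 2
      have hrec : m / 2 ≤ f := by omega
      rw [pvBinLoop]
      rw [if_pos hpos, hdiv, hmod, ih (m / 2) _ hrec]
      conv_rhs => rw [pvBinChars]
      rw [if_neg hm]
      have d0 : (PySem.Int.toStr 0).toList = ['0'] := by decide
      have d1 : (PySem.Int.toStr 1).toList = ['1'] := by decide
      rcases Nat.mod_two_eq_zero_or_one m with h2 | h2 <;> simp [h2, d0, d1]

theorem pvStrCount1 (s : String) : PySem.Str.count s "1" = s.toList.count '1' := by
  have h := pvStrCount_singleton s '1'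
  rwa [show String.ofList ['1'] = "1" from by decide] at h

theorem pvStrCount0 (s : String) : PySem.Str.count s "0" = s.toList.count '0' := by
  have h := pvStrCount_singleton s '0'
  rwa [show String.ofList ['0'] = "0" from by decide] at h

theorem pvBinChars_count1 (m : Nat) : (pvBinChars m).count '1' = PySem.Int.bitCount (m : Int) := by
  induction m using Nat.strong_induction_on with
  | _ m ih =>
    by_cases hm : m = 0
    · subst hm; rw [pvBinChars]; decide
    · rw [pvBinChars, if_neg hm, PySem.Int.bitCount_natCast (Nat.pos_of_ne_zero hm),
        List.count_append, ih (m / 2) (by omega)]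
      rcases Nat.mod_two_eq_zero_or_one m with h2 | h2 <;> simp [h2] <;> omega

theorem pvBinChars_length (m : Nat) : (pvBinChars m).length = PySem.Int.bitLength (m : Int) := by
  induction m using Nat.strong_induction_on with
  | _ m ih =>
    by_cases hm : m = 0
    · subst hm; rw [pvBinChars]; decide
    · rw [pvBinChars, if_neg hm, PySem.Int.bitLength_natCast (Nat.pos_of_ne_zero hm),
        List.length_append, ih (m / 2) (by omega)]
      simp

theorem pvBinChars_count0 (m : Nat) :
    ((pvBinChars m).count '0' : Int) =
      (PySem.Int.bitLength (m : Int) : Int) - (PySem.Int.bitCount (m : Int) : Int) := by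
  induction m using Nat.strong_induction_on with
  | _ m ih =>
    by_cases hm : m = 0
    · subst hm; rw [pvBinChars]; decide
    · rw [pvBinChars, if_neg hm, PySem.Int.bitLength_natCast (Nat.pos_of_ne_zero hm),
        PySem.Int.bitCount_natCast (Nat.pos_of_ne_zero hm), List.count_append]
      have h := ih (m / 2) (by omega)
      rcases Nat.mod_two_eq_zero_or_one m with h2 | h2 <;> simp [h2] <;> push_cast at h ⊢ <;> omega

theorem pvBitCount_pos (m : Nat) (h : 1 ≤ m) : 1 ≤ PySem.Int.bitCount (m : Int) := by
  induction m using Nat.strong_induction_on with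
  | _ m ih =>
    rw [PySem.Int.bitCount_natCast (by omega)]
    by_cases hh : m / 2 = 0
    · have : m % 2 = 1 := by omega
      omega
    · have := ih (m / 2) (by omega) (by omega)
      omega

theorem pvBitCount_lt (m : Nat) (h : 2 ≤ m) : PySem.Int.bitCount (m : Int) < m := by
  induction m using Nat.strong_induction_on with
  | _ m ih =>
    rw [PySem.Int.bitCount_natCast (by omega)]
    by_cases hh : m / 2 = 1
    · rw [hh]
      have : PySem.Int.bitCount ((1 : Nat) : Int) = 1 := by decide
      rw [this]; omega
    · have := ih (m / 2) (by omega) (by omega)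
      omega

theorem pvStrOf_eq_one_iff (m : Nat) (h : 1 ≤ m) :
    (pvBinLoop m (m : Int) "" = "1") ↔ m = 1 := by
  have htl := pvBinLoop_toList m m "" le_rfl
  rw [show ("" : String).toList = [] from rfl, List.append_nil] at htl
  constructor
  · intro hs
    have hl : (pvBinChars m).length = 1 := by
      rw [← htl, hs]; rfl
    rw [pvBinChars_length] at hl
    have hb := PySem.Int.lt_two_pow_bitLength ((m : Int))
    rw [hl] at hb
    simp [Int.natAbs_natCast] at hb
    omega
  · intro hm
    subst hm
    apply String.toList_inj.mp
    rw [htl]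
    rw [pvBinChars, if_neg (by omega), pvBinChars]
    rfl

-- the specification both programs compute: (transforms, zeros removed) to reduce m to 1
def pvF (m : Nat) : Int × Int :=
  if hm : m ≤ 1 then (0, 0)
  else
    let p := PySem.Int.bitCount (m : Int)
    ((pvF p).1 + 1, (pvF p).2 + (PySem.Int.bitLength (m : Int) : Int) - p)
termination_by m
decreasing_by exact pvBitCount_lt m (by omega)

-- A's outer loop, started at the binary string of m, computes pvF m
theorem pvLoopA_F (fuel : Nat) : ∀ (m : Nat) (conv zeros : Int), 1 ≤ m → m ≤ fuel →
    pvLoopA fuel (pvBinLoop m (m : Int) "") conv zeros =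
      [conv + (pvF m).1, zeros + (pvF m).2] := by
  induction fuel with
  | zero => intro m conv zeros h1 h2; omega
  | succ f ih =>
    intro m conv zeros h1 h2
    by_cases hm1 : m = 1
    · subst hm1
      have hs : pvBinLoop 1 ((1 : Nat) : Int) "" = "1" := (pvStrOf_eq_one_iff 1 le_rfl).mpr rfl
      rw [pvLoopA, if_pos hs, pvF]
      norm_num
    · have hs : ¬ (pvBinLoop m (m : Int) "" = "1") :=
        fun hh => hm1 ((pvStrOf_eq_one_iff m h1).mp hh)
      rw [pvLoopA, if_neg hs]
      have htl := pvBinLoop_toList m m "" le_rfl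
      rw [show ("" : String).toList = [] from rfl, List.append_nil] at htl
      have hc1 : PySem.Str.count (pvBinLoop m (m : Int) "") "1" = PySem.Int.bitCount (m : Int) := by
        rw [pvStrCount1, htl, pvBinChars_count1]
      have hc0 : ((PySem.Str.count (pvBinLoop m (m : Int) "") "0" : Int)) =
          (PySem.Int.bitLength (m : Int) : Int) - (PySem.Int.bitCount (m : Int) : Int) := by
        rw [pvStrCount0, htl, pvBinChars_count0]
      rw [hc1, hc0]
      simp only [Int.toNat_natCast]
      rw [ih (PySem.Int.bitCount (m : Int)) (conv + 1) _
        (pvBitCount_pos m h1) (by have := pvBitCount_lt m (by omega); omega)]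
      conv_rhs => rw [pvF]
      rw [dif_neg (by omega)]
      simp only [List.cons.injEq, and_true]
      exact ⟨by ring, by ring⟩

-- B's dp table: after the fold up to n, it has length n+1 and dp[m] = pvF m for 1 ≤ m ≤ n
def pvDp (n : Nat) : List (Int × Int) :=
  (PySem.List.pyRange 2 ((n : Int) + 1) 1).foldl pvDpStep [(0, 0), (0, 0)]

theorem pvDp_spec (n : Nat) (hn : 1 ≤ n) :
    (pvDp n).length = n + 1 ∧ ∀ m : Nat, 1 ≤ m → m ≤ n → (pvDp n)[m]? = some (pvF m) := by
  induction n with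
  | zero => omega
  | succ k ih =>
    by_cases hk : k = 0
    · subst hk
      refine ⟨by decide, ?_⟩
      intro m h1 h2
      interval_cases m
      rw [show pvF 1 = (0, 0) from by rw [pvF]; simp]
      decide
    · have hk1 : 1 ≤ k := by omega
      obtain ⟨hlen, hget⟩ := ih hk1
      have hsplit : PySem.List.pyRange 2 ((↑(k + 1) : Int) + 1) 1 =
          PySem.List.pyRange 2 ((k : Int) + 1) 1 ++ [((k : Int) + 1)] := by
        push_cast
        exact PySem.List.pyRange_one_succ_right (a := 2) (b := (k : Int) + 1) (by omega)
      have hstep : pvDp (k + 1) = pvDpStep (pvDp k) ((k : Int) + 1) := by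
        rw [pvDp, hsplit, List.foldl_append]
        rfl
      have hcast : ((k : Int) + 1) = ((k + 1 : Nat) : Int) := by push_cast; ring
      -- the popcount p of k+1 satisfies 1 ≤ p ≤ k
      set p := PySem.Int.bitCount ((k + 1 : Nat) : Int) with hp
      have hp1 : 1 ≤ p := pvBitCount_pos (k + 1) (by omega)
      have hp2 : p ≤ k := by have := pvBitCount_lt (k + 1) (by omega); omega
      have hlook : (PySem.List.pyGet? (pvDp k) ((p : Nat) : Int)).getD (0, 0) = pvF p := by
        rw [PySem.List.pyGet?_natCast, hget p hp1 hp2]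
        rfl
      have hF : pvF (k + 1) =
          ((pvF p).1 + 1, (pvF p).2 + (PySem.Int.bitLength ((k + 1 : Nat) : Int) : Int) - p) := by
        rw [pvF, dif_neg (by omega)]
      constructor
      · rw [hstep, pvDpStep]
        simp only [hcast]
        simp [hlen]
      · intro m h1 h2
        rw [hstep, pvDpStep]
        simp only [hcast, ← hp]
        by_cases hm : m ≤ k
        · rw [List.getElem?_append_left (by omega)]
          exact hget m h1 hm
        · have hmk : m = k + 1 := by omega
          subst hmk
          rw [hlook, List.getElem?_append_right (by omega), hF]
          simp [hlen]

-- ===== VERDICT (by name: the statement is the Claim_ definition above) =====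
theorem solution_spec : Claim_equal_solution := by
  intro s _ hpre
  unfold Spec_solution solution solution_alt
  by_cases h1 : s = "1"
  · simp [h1, pvLoopA]
  · have hc : 1 ≤ PySem.Str.count s "1" := by
      rcases hpre with h | h
      · exact absurd h h1
      · exact h
    set n := PySem.Str.count s "1" with hn
    rw [pvLoopA, if_neg h1, if_neg h1]
    simp only [Int.toNat_natCast, ← hn]
    rw [pvLoopA_F n n (0 + 1) (0 + (PySem.Str.count s "0" : Int)) hc le_rfl]
    obtain ⟨hlen, hget⟩ := pvDp_spec n hc
    have hlook : (PySem.List.pyGet? (pvDp n) ((n : Nat) : Int)).getD (0, 0) = pvF n := by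
      rw [PySem.List.pyGet?_natCast, hget n hc le_rfl]
      rfl
    simp only [pvDp] at hlook
    simp only [hlook]
    simp only [List.cons.injEq, and_true]
    exact ⟨by ring, by ring⟩
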